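-- pv_equiv track=rewrite | github.com/dadflip/IA-Project | x-archive/main.py | coabite
-- ===== SOURCE A (Python) =====
-- def coabite(Piece1, Piece2):
--     # permet de savoir si deux piece peuvent se géner (ne prend pas en compte les piece déjà placer sur la grille)
--     if Piece1[3] == Piece2[3]:
--         return False
--     for row1 in range(len(Piece1[0])):
--         for col1 in range(len(Piece1[0][row1])):
--             for row2 in range(len(Piece2[0])):
--                 for col2 in range(len(Piece2[0][row2])):
--                     #si les deux se superpose en se point
--                     if Piece1[1] + row1 == Piece2[1] + row2 and Piece1[2] + col1 == Piece2[2] + col2: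
--                         #si à ce point les deux pieces sont remplie
--                         if Piece1[0][row1][col1] == Piece2[0][row2][col2] == 1:
--                             return False
--     return True
-- ===== SOURCE B (Python) =====
-- def coabite(Piece1, Piece2):
--     if Piece1[3] == Piece2[3]:
--         return False
--     grid2, roff2, coff2 = Piece2[0], Piece2[1], Piece2[2]
--     for r1, row in enumerate(Piece1[0]):
--         for c1, v in enumerate(row):
--             if v != 1:
--                 continue
--             r2 = Piece1[1] + r1 - roff2
--             c2 = Piece1[2] + c1 - coff2
--             if 0 <= r2 < len(grid2) and 0 <= c2 < len(grid2[r2]) and grid2[r2][c2] == 1: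
--                 return False
--     return True
-- ===== Notes on version B (the rewrite author's own statement) =====
-- stated objective: faster
-- what changed: Replaces A's quadruple nested scan over all cell pairs by a single scan over piece 1's cells that maps each filled cell directly to the corresponding local cell of piece 2 with a bounds check.
import Mathlib
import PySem

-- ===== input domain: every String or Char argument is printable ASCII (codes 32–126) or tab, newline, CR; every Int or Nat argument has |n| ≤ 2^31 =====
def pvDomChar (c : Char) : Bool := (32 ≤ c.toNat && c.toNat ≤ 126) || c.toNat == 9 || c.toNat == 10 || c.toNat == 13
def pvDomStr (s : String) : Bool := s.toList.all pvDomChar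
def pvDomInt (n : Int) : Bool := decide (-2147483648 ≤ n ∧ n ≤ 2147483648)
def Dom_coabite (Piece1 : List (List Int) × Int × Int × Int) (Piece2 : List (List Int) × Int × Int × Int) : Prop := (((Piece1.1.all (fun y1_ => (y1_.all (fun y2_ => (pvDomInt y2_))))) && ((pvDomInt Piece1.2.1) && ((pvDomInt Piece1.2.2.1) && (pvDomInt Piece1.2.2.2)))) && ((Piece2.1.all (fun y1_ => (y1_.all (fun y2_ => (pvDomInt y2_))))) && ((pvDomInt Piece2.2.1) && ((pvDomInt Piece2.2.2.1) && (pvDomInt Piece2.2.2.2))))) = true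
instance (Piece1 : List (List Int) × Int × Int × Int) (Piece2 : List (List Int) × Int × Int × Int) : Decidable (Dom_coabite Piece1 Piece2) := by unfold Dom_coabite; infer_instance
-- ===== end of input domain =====

-- B replaces A's quadruple nested scan over all cell pairs by a single scan over piece 1's
-- cells with a direct bounds-checked lookup into piece 2's grid (objective: faster).


-- ===== PORT A =====
-- literal port of A: if same id then False; else quadruple loop over all (row1,col1,row2,col2),
-- return False when positions coincide and cell1 == cell2 == 1 (chained comparison); else True.
def coabite (Piece1 : List (List Int) × Int × Int × Int) (Piece2 : List (List Int) × Int × Int × Int) : Bool :=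
  if Piece1.2.2.2 = Piece2.2.2.2 then false
  else
    !((List.range Piece1.1.length).any fun row1 =>
      (List.range (Piece1.1.getD row1 []).length).any fun col1 =>
        (List.range Piece2.1.length).any fun row2 =>
          (List.range (Piece2.1.getD row2 []).length).any fun col2 =>
            (decide (Piece1.2.1 + (row1 : Int) = Piece2.2.1 + (row2 : Int)) &&
             decide (Piece1.2.2.1 + (col1 : Int) = Piece2.2.2.1 + (col2 : Int))) &&
            (decide ((Piece1.1.getD row1 []).getD col1 0 = (Piece2.1.getD row2 []).getD col2 0) &&
             decide ((Piece2.1.getD row2 []).getD col2 0 = (1 : Int))))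

-- ===== PORT B =====
-- literal port of B: scan piece 1's cells with enumerate; for each filled cell map to piece 2's
-- local indices, bounds-check against piece 2's jagged rows and test the single cell.
def coabite_alt (Piece1 : List (List Int) × Int × Int × Int) (Piece2 : List (List Int) × Int × Int × Int) : Bool :=
  if Piece1.2.2.2 = Piece2.2.2.2 then false
  else
    !((PySem.List.enumerate Piece1.1).any fun p =>
        (PySem.List.enumerate p.2).any fun q =>
          decide (q.2 = (1 : Int)) &&
          (let r2 : Int := Piece1.2.1 + p.1 - Piece2.2.1
           let c2 : Int := Piece1.2.2.1 + q.1 - Piece2.2.2.1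
           decide (0 ≤ r2 ∧ r2 < (Piece2.1.length : Int)) &&
           (decide (0 ≤ c2 ∧ c2 < ((Piece2.1.getD r2.toNat []).length : Int)) &&
            decide ((Piece2.1.getD r2.toNat []).getD c2.toNat 0 = (1 : Int)))))

-- ===== PRECONDITION & SPEC =====
def Spec_coabite (Piece1 : List (List Int) × Int × Int × Int) (Piece2 : List (List Int) × Int × Int × Int) (out : Bool) : Prop := out = coabite_alt Piece1 Piece2
instance (Piece1 : List (List Int) × Int × Int × Int) (Piece2 : List (List Int) × Int × Int × Int) (out : Bool) : Decidable (Spec_coabite Piece1 Piece2 out) := by unfold Spec_coabite; infer_instance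

-- ===== CLAIM (what is proved, stated in full; the proofs are below) =====
def Claim_equal_coabite : Prop := ∀ (Piece1 : List (List Int) × Int × Int × Int) (Piece2 : List (List Int) × Int × Int × Int), Dom_coabite Piece1 Piece2 → Spec_coabite Piece1 Piece2 (coabite Piece1 Piece2)

-- ===== LEMMAS AND PROOFS =====

theorem coabite_inner_iff (Piece1 Piece2 : List (List Int) × Int × Int × Int) :
    ((List.range Piece1.1.length).any fun row1 =>
      (List.range (Piece1.1.getD row1 []).length).any fun col1 =>
        (List.range Piece2.1.length).any fun row2 =>
          (List.range (Piece2.1.getD row2 []).length).any fun col2 =>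
            (decide (Piece1.2.1 + (row1 : Int) = Piece2.2.1 + (row2 : Int)) &&
             decide (Piece1.2.2.1 + (col1 : Int) = Piece2.2.2.1 + (col2 : Int))) &&
            (decide ((Piece1.1.getD row1 []).getD col1 0 = (Piece2.1.getD row2 []).getD col2 0) &&
             decide ((Piece2.1.getD row2 []).getD col2 0 = (1 : Int))))
    =
    ((PySem.List.enumerate Piece1.1).any fun p =>
        (PySem.List.enumerate p.2).any fun q =>
          decide (q.2 = (1 : Int)) &&
          (let r2 : Int := Piece1.2.1 + p.1 - Piece2.2.1
           let c2 : Int := Piece1.2.2.1 + q.1 - Piece2.2.2.1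
           decide (0 ≤ r2 ∧ r2 < (Piece2.1.length : Int)) &&
           (decide (0 ≤ c2 ∧ c2 < ((Piece2.1.getD r2.toNat []).length : Int)) &&
            decide ((Piece2.1.getD r2.toNat []).getD c2.toNat 0 = (1 : Int))))) := by
  rw [Bool.eq_iff_iff]
  simp only [List.any_eq_true, List.mem_range, PySem.List.mem_enumerate_iff]
  constructor
  · rintro ⟨r1, h1, c1, hc1, r2, h2, c2, hc2, hcond⟩
    simp only [Bool.and_eq_true, decide_eq_true_eq] at hcond
    obtain ⟨⟨hrow, hcol⟩, hcell1, hcell2⟩ := hcond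
    rw [List.getD_eq_getElem _ _ h1] at hc1 hcell1
    rw [List.getD_eq_getElem _ _ h2] at hc2 hcell1 hcell2
    rw [List.getD_eq_getElem _ _ hc1] at hcell1
    rw [List.getD_eq_getElem _ _ hc2] at hcell1 hcell2
    refine ⟨(0 + (r1:Int), Piece1.1[r1]), ⟨r1, h1, rfl⟩, (0 + (c1:Int), Piece1.1[r1][c1]), ⟨c1, hc1, rfl⟩, ?_⟩
    have hr2 : Piece1.2.1 + (0 + (r1:Int)) - Piece2.2.1 = (r2:Int) := by omega
    have hc2' : Piece1.2.2.1 + (0 + (c1:Int)) - Piece2.2.2.1 = (c2:Int) := by omega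
    simp only [hr2, hc2', Int.toNat_natCast, List.getD_eq_getElem _ _ h2,
      List.getD_eq_getElem _ _ hc2, Bool.and_eq_true, decide_eq_true_eq]
    exact ⟨hcell1.trans hcell2, ⟨by omega, by exact_mod_cast h2⟩, ⟨by omega, by exact_mod_cast hc2⟩, hcell2⟩
  · rintro ⟨p, ⟨r1, h1, rfl⟩, q, ⟨c1, hc1, rfl⟩, hcond⟩
    simp only [zero_add, Bool.and_eq_true, decide_eq_true_eq] at hcond
    obtain ⟨hv, ⟨hr0, hrlt⟩, ⟨hc0, hclt⟩, hcell2⟩ := hcond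
    have hre : ((Piece1.2.1 + (r1:Int) - Piece2.2.1).toNat : Int) = Piece1.2.1 + (r1:Int) - Piece2.2.1 :=
      Int.toNat_of_nonneg hr0
    have hce : ((Piece1.2.2.1 + (c1:Int) - Piece2.2.2.1).toNat : Int) = Piece1.2.2.1 + (c1:Int) - Piece2.2.2.1 :=
      Int.toNat_of_nonneg hc0
    have h2 : (Piece1.2.1 + (r1:Int) - Piece2.2.1).toNat < Piece2.1.length := by omega
    have hc2 : (Piece1.2.2.1 + (c1:Int) - Piece2.2.2.1).toNat < (Piece2.1.getD (Piece1.2.1 + (r1:Int) - Piece2.2.1).toNat []).length := by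
      rw [List.getD_eq_getElem _ _ h2]
      rw [List.getD_eq_getElem _ _ h2] at hclt
      omega
    refine ⟨r1, h1, c1, by rw [List.getD_eq_getElem _ _ h1]; exact hc1, (Piece1.2.1 + (r1:Int) - Piece2.2.1).toNat, h2,
      (Piece1.2.2.1 + (c1:Int) - Piece2.2.2.1).toNat, hc2, ?_⟩
    simp only [Bool.and_eq_true, decide_eq_true_eq]
    rw [List.getD_eq_getElem _ _ h1]
    exact ⟨⟨by omega, by omega⟩, (List.getD_eq_getElem _ _ hc1 ▸ hv).trans hcell2.symm, hcell2⟩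


-- ===== VERDICT (by name: the statement is the Claim_ definition above) =====
theorem coabite_spec : Claim_equal_coabite := by
  intro P1 P2 _
  unfold Spec_coabite coabite coabite_alt
  split_ifs with h
  · rfl
  · rw [coabite_inner_iff]
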